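-- pv_equiv track=rewrite | github.com/daannte/aot | year2025/day03.py | right_side_maxima
-- ===== SOURCE A (Python) =====
-- def right_side_maxima(digits: list[int]) -> list[int]:
--     n = len(digits)
--     res = [0] * n
--     max_so_far = -1
--
--     for i in range(n - 1, -1, -1):
--         res[i] = max_so_far
--         max_so_far = max(max_so_far, digits[i])
--
--     return res
-- ===== SOURCE B (Python) =====
-- def right_side_maxima(digits: list[int]) -> list[int]:
--     # Divide and conquer: solve each half independently; the left half's
--     # right-side maxima within the whole list are its local answers capped
--     # below by the maximum of the right half (= max(first right digit, its
--     # own right-side max)). Base cases supply the -1 floor.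
--     n = len(digits)
--     if n == 0:
--         return []
--     if n == 1:
--         return [-1]
--     mid = n // 2
--     left = right_side_maxima(digits[:mid])
--     right = right_side_maxima(digits[mid:])
--     mr = max(digits[mid], right[0])
--     return [max(x, mr) for x in left] + right
-- ===== Notes on version B (the rewrite author's own statement) =====
-- stated objective: alternative
-- what changed: B replaces A's single backward running-max scan with a divide-and-conquer: recursively solve the two halves, then cap the left half's answers by the right half's overall maximum; base cases supply the -1 floor.
import Mathlib
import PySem

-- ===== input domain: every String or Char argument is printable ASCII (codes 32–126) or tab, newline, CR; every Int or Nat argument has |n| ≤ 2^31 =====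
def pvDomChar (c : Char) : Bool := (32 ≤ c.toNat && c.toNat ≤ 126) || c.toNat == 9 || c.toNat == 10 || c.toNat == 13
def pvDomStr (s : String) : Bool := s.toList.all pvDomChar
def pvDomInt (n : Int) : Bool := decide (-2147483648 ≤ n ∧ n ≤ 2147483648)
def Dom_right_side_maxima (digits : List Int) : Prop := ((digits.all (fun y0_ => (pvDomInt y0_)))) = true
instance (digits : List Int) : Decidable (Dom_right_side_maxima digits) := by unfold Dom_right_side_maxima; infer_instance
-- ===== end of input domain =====

-- B replaces A's backward running-max scan by a divide-and-conquer recursion: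
-- solve both halves, then cap the left half's answers by the right half's
-- overall maximum (objective: alternative, same order of cost).

-- ===== PORT A =====
-- literal transliteration of A: res preallocated, backward index loop writing
-- res[i] before updating max_so_far.  digits[i] is ported with pyGet?;
-- the loop index is always in range, so the .getD default is never used.
def right_side_maxima (digits : List Int) : List Int :=
  let n : Int := (digits.length : Int)
  let res : List Int := List.replicate digits.length (0 : Int)
  let st := (PySem.List.pyRange (n - 1) (-1) (-1)).foldl
      (fun (st : List Int × Int) (i : Int) =>
        (st.1.set i.toNat st.2, max st.2 ((PySem.List.pyGet? digits i).getD 0)))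
      (res, (-1 : Int))
  st.1

-- ===== PORT B =====
-- literal transliteration of B: base cases [] and [-1]; otherwise split at
-- mid = n // 2, recurse on digits[:mid] and digits[mid:] (ported with slice),
-- mr = max(digits[mid], right[0]) (ported with pyGet?; both indices are in
-- range, so the .getD defaults are never used), and combine.
def right_side_maxima_alt (digits : List Int) : List Int :=
  if h0 : digits.length = 0 then []
  else if h1 : digits.length = 1 then [(-1 : Int)]
  else
    let mid : Nat := digits.length / 2
    let left := right_side_maxima_alt (PySem.List.slice digits none (some (mid : Int)))
    let right := right_side_maxima_alt (PySem.List.slice digits (some (mid : Int)) none)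
    let mr := max ((PySem.List.pyGet? digits (mid : Int)).getD 0)
                  ((PySem.List.pyGet? right (0 : Int)).getD 0)
    left.map (fun x => max x mr) ++ right
termination_by digits.length
decreasing_by
  · rw [PySem.List.slice_to_natCast]
    simp only [List.length_take]
    omega
  · rw [PySem.List.slice_from_natCast]
    simp only [List.length_drop]
    omega

-- ===== PRECONDITION & SPEC =====
def Spec_right_side_maxima (digits : List Int) (out : List Int) : Prop := out = right_side_maxima_alt digits
instance (digits : List Int) (out : List Int) : Decidable (Spec_right_side_maxima digits out) := by unfold Spec_right_side_maxima; infer_instance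

-- ===== CLAIM (what is proved, stated in full; the proofs are below) =====
def Claim_equal_right_side_maxima : Prop := ∀ (digits : List Int), Dom_right_side_maxima digits → Spec_right_side_maxima digits (right_side_maxima digits)

-- ===== LEMMAS AND PROOFS =====

-- reference value: (exclusive right-side maxima with floor m, running max)
def pvSM : List Int → Int → List Int × Int
  | [], m => ([], m)
  | d :: t, m =>
      let p := pvSM t m
      (p.2 :: p.1, max p.2 d)

theorem pvSM_append (l : List Int) (d m : Int) :
    pvSM (l ++ [d]) m = ((pvSM l (max m d)).1 ++ [m], (pvSM l (max m d)).2) := by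
  induction l with
  | nil => simp [pvSM]
  | cons x l ih => simp [pvSM, ih]

theorem loopA (digits : List Int) : ∀ (k : Nat), k ≤ digits.length →
    ∀ (r : List Int) (m : Int), digits.length ≤ r.length →
    (PySem.List.pyRange ((k : Int) - 1) (-1) (-1)).foldl
      (fun (st : List Int × Int) (i : Int) =>
        (st.1.set i.toNat st.2, max st.2 ((PySem.List.pyGet? digits i).getD 0)))
      (r, m)
    = ((pvSM (digits.take k) m).1 ++ r.drop k, (pvSM (digits.take k) m).2) := by
  intro k
  induction k with
  | zero =>
      intro _ r m _
      rw [PySem.List.pyRange_neg_one_eq_nil (by norm_num)]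
      simp [pvSM]
  | succ k ih =>
      intro hk r m hr
      have hklt : k < digits.length := by omega
      rw [show (((k + 1 : Nat) : Int) - 1) = (k : Int) by push_cast; ring]
      rw [PySem.List.pyRange_neg_one_cons (by omega)]
      · simp only [List.foldl_cons]
        have hget : (PySem.List.pyGet? digits (k : Int)).getD 0 = digits[k] := by
          rw [PySem.List.pyGet?_natCast]
          simp [List.getElem?_eq_getElem hklt]
        rw [show ((k : Int) - 1) = ((k : Nat) : Int) - 1 from rfl] at *
        have := ih (by omega) (r.set (k : Int).toNat m)
          (max m ((PySem.List.pyGet? digits (k : Int)).getD 0)) (by simpa using hr)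
        simp only [Int.toNat_natCast] at this ⊢
        rw [this]
        have htake : digits.take (k + 1) = digits.take k ++ [digits[k]] := by
          rw [List.take_add_one, List.getElem?_eq_getElem hklt]; rfl
        have hdrop : (r.set k m).drop k = m :: r.drop (k + 1) := by
          have hkr : k < r.length := by omega
          rw [List.drop_set]
          simp only [lt_irrefl, Nat.sub_self]
          rw [List.drop_eq_getElem_cons hkr]
          rfl
        rw [htake, pvSM_append, hget, hdrop]
        simp

theorem portA_eq (digits : List Int) :
    right_side_maxima digits = (pvSM digits (-1)).1 := by
  unfold right_side_maxima
  have h := loopA digits digits.length (le_refl _)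
    (List.replicate digits.length (0 : Int)) (-1) (by simp)
  simp only [h, List.take_length]
  simp

-- the running max never drops below the floor
theorem pvSM_le (l : List Int) (m : Int) : m ≤ (pvSM l m).2 := by
  induction l with
  | nil => simp [pvSM]
  | cons d t ih => simpa [pvSM] using le_trans ih (le_max_left _ _)

-- splitting lemma: solving a ++ b is solving b, then a with floor (pvSM b m).2
theorem pvSM_split (a b : List Int) (m : Int) :
    pvSM (a ++ b) m
      = ((pvSM a (pvSM b m).2).1 ++ (pvSM b m).1, (pvSM a (pvSM b m).2).2) := by
  induction a with
  | nil => simp [pvSM]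
  | cons d t ih => simp [pvSM, ih]

-- floor-lifting lemma: raising the floor to m ≥ -1 caps every answer by m
theorem pvSM_lift (a : List Int) (m : Int) (hm : -1 ≤ m) :
    (pvSM a m).1 = (pvSM a (-1)).1.map (fun x => max x m)
      ∧ (pvSM a m).2 = max (pvSM a (-1)).2 m := by
  induction a with
  | nil => exact ⟨by simp [pvSM], by simp [pvSM, max_eq_right hm]⟩
  | cons d t ih =>
      constructor
      · simp only [pvSM, ih.1, ih.2, List.map_cons]
      · simp only [pvSM, ih.2]
        exact max_right_comm _ _ _

theorem portB_eq (digits : List Int) :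
    right_side_maxima_alt digits = (pvSM digits (-1)).1 := by
  induction digits using right_side_maxima_alt.induct with
  | case1 digits h0 =>
      rw [List.length_eq_zero_iff] at h0
      subst h0
      simp [right_side_maxima_alt, pvSM]
  | case2 digits h0 h1 =>
      obtain ⟨d, rfl⟩ := List.length_eq_one_iff.mp h1
      simp [right_side_maxima_alt, pvSM]
  | case3 digits h0 h1 mid ihL ihR =>
      have hm : mid = digits.length / 2 := rfl
      clear_value mid
      rw [right_side_maxima_alt]
      simp only [h0, h1, dite_false]
      rw [← hm]
      rw [PySem.List.slice_to_natCast] at ihL ⊢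
      rw [PySem.List.slice_from_natCast] at ihR ⊢
      have hmlt : mid < digits.length := by omega
      -- the right half is nonempty: write it as digits[mid] :: rest
      have hdrop : digits.drop mid = digits[mid] :: digits.drop (mid + 1) :=
        List.drop_eq_getElem_cons hmlt
      have hget : (PySem.List.pyGet? digits (mid : Int)).getD 0 = digits[mid] := by
        rw [PySem.List.pyGet?_natCast]
        simp [List.getElem?_eq_getElem hmlt]
      rw [ihL, ihR]
      -- mr = max(digits[mid], right[0]) is the overall max of the right half
      have hmr : max ((PySem.List.pyGet? digits (mid : Int)).getD 0)
            ((PySem.List.pyGet? (pvSM (digits.drop mid) (-1)).1 (0 : Int)).getD 0)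
          = (pvSM (digits.drop mid) (-1)).2 := by
        rw [hget, hdrop]
        simp [pvSM, PySem.List.pyGet?, PySem.List.pyIdx?, max_comm]
      rw [hmr]
      conv_rhs => rw [← List.take_append_drop mid digits]
      rw [pvSM_split]
      have hlift := pvSM_lift (digits.take mid) ((pvSM (digits.drop mid) (-1)).2)
        (pvSM_le _ _)
      rw [hlift.1]

-- ===== VERDICT (by name: the statement is the Claim_ definition above) =====
theorem right_side_maxima_spec : Claim_equal_right_side_maxima := by
  intro digits _
  unfold Spec_right_side_maxima
  rw [portA_eq, portB_eq]
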